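-- pv_equiv track=rewrite | github.com/aaron-alderman/random-thoughts | physics/candidate papers/spin2_3/checks/check_so24_selector.py | so_generator
-- ===== SOURCE A (Python) =====
-- from typing import Dict, List, Tuple
--
-- Matrix = List[List[int]]
--
-- def zeros(n: int) -> Matrix:
--     return [[0 for _ in range(n)] for _ in range(n)]
--
-- def so_generator(eta_diag: List[int], a: int, b: int) -> Matrix:
--     """
--     Build the standard so(p,q) generator J^{ab} in the vector rep:
--       (J^{ab})^c_d = delta^a_d eta^{bc} - delta^b_d eta^{ac}
--     For diagonal eta, eta^{ii} == eta_{ii} == eta_diag[i] (up to sign conventions).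
--     """
--     n = len(eta_diag)
--     if a == b:
--         raise ValueError("a and b must differ")
--     g = zeros(n)
--     for c in range(n):
--         # column d=a contributes + eta^{bc} at row c
--         g[c][a] += (1 if b == c else 0) * eta_diag[b]
--         # column d=b contributes - eta^{ac} at row c
--         g[c][b] -= (1 if a == c else 0) * eta_diag[a]
--     return g
-- ===== SOURCE B (Python) =====
-- from typing import List
--
-- Matrix = List[List[int]]
--
-- def so_generator(eta_diag: List[int], a: int, b: int) -> Matrix:
--     """
--     Closed form of the delta-sifted loop: summing delta(b, c) over
--     c in range(n) contributes exactly once, iff 0 <= b < n (and the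
--     same for a), so at most two entries are written directly.
--     """
--     n = len(eta_diag)
--     if a == b:
--         raise ValueError("a and b must differ")
--     g = [[0] * n for _ in range(n)]
--     if 0 <= b < n:
--         g[b][a] += eta_diag[b]
--     if 0 <= a < n:
--         g[a][b] -= eta_diag[a]
--     return g
-- ===== Notes on version B (the rewrite author's own statement) =====
-- stated objective: simpler
-- what changed: Replaces the scan over all rows c with its closed form: since delta(b,c) summed over c in range(n) fires exactly once iff 0 <= b < n, B writes the at most two nonzero entries directly after building the zero matrix.
import Mathlib
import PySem

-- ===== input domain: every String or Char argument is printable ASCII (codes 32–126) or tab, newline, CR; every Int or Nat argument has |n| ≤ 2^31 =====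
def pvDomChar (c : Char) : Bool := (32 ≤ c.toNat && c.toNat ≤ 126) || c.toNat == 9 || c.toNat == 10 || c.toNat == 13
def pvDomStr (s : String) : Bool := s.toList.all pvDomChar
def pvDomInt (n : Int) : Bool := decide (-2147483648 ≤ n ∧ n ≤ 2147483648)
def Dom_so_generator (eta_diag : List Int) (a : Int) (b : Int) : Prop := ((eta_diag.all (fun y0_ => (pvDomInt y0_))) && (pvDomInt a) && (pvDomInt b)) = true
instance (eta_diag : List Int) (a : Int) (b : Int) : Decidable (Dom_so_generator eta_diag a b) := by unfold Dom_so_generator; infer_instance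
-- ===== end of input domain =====

-- B replaces A's scan over all rows c by the closed form of the delta-sifted sum:
-- only the rows c = b and c = a receive a nonzero write, so B writes those two
-- entries directly (objective: simpler).

-- ===== PORT A =====

-- shared Python-indexing helpers:  g[r][c] += t  /  g[r][c] -= t  (Python index semantics via PySem)
def plusAt (g : List (List Int)) (r c t : Int) : List (List Int) :=
  let row := PySem.List.pyGetD g r []
  PySem.List.pySetD g r (PySem.List.pySetD row c (PySem.List.pyGetD row c 0 + t))

def minusAt (g : List (List Int)) (r c t : Int) : List (List Int) :=
  let row := PySem.List.pyGetD g r []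
  PySem.List.pySetD g r (PySem.List.pySetD row c (PySem.List.pyGetD row c 0 - t))

-- zeros(n) = [[0 for _ in range(n)] for _ in range(n)]
def zerosA (n : Int) : List (List Int) :=
  (PySem.List.pyRange 0 n 1).map (fun _ => (PySem.List.pyRange 0 n 1).map (fun _ => (0 : Int)))

-- the body of A's `for c in range(n)` loop
def stepA (eta_diag : List Int) (a b : Int) (g : List (List Int)) (c : Int) : List (List Int) :=
  let g1 := plusAt g c a ((if b = c then (1 : Int) else 0) * PySem.List.pyGetD eta_diag b 0)
  minusAt g1 c b ((if a = c then (1 : Int) else 0) * PySem.List.pyGetD eta_diag a 0)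

-- port of A; `raise ValueError` on a == b is outside Pre_, the port returns [] there
def so_generator (eta_diag : List Int) (a : Int) (b : Int) : List (List Int) :=
  let n : Int := eta_diag.length
  if a = b then []
  else (PySem.List.pyRange 0 n 1).foldl (stepA eta_diag a b) (zerosA n)

-- ===== PORT B =====

-- port of B; same ValueError guard (outside Pre_), then the two direct writes
def so_generator_alt (eta_diag : List Int) (a : Int) (b : Int) : List (List Int) :=
  let n : Int := eta_diag.length
  if a = b then []
  else
    let g := List.replicate eta_diag.length (List.replicate eta_diag.length (0 : Int))
    let g := if 0 ≤ b ∧ b < n then plusAt g b a (PySem.List.pyGetD eta_diag b 0) else g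
    if 0 ≤ a ∧ a < n then minusAt g a b (PySem.List.pyGetD eta_diag a 0) else g

-- ===== PRECONDITION & SPEC =====
-- Pre_ excludes exactly the inputs on which the Python A raises: a == b (ValueError),
-- and, for nonempty eta_diag, a or b outside [-n, n-1] (IndexError on eta_diag[a] / eta_diag[b]).
def Pre_so_generator (eta_diag : List Int) (a : Int) (b : Int) : Prop :=
  a ≠ b ∧ (eta_diag = [] ∨
    (-(eta_diag.length : Int) ≤ a ∧ a < eta_diag.length ∧
     -(eta_diag.length : Int) ≤ b ∧ b < eta_diag.length))
instance (eta_diag : List Int) (a : Int) (b : Int) : Decidable (Pre_so_generator eta_diag a b) := by unfold Pre_so_generator; infer_instance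

def pvWitness_so_generator : List Int × Int × Int := ([1, -1, -1], 0, 2)

def Spec_so_generator (eta_diag : List Int) (a : Int) (b : Int) (out : List (List Int)) : Prop := out = so_generator_alt eta_diag a b
instance (eta_diag : List Int) (a : Int) (b : Int) (out : List (List Int)) : Decidable (Spec_so_generator eta_diag a b out) := by unfold Spec_so_generator; infer_instance

-- ===== CLAIM (what is proved, stated in full; the proofs are below) =====
def Claim_equal_so_generator : Prop := ∀ (eta_diag : List Int) (a : Int) (b : Int), Dom_so_generator eta_diag a b → Pre_so_generator eta_diag a b → Spec_so_generator eta_diag a b (so_generator eta_diag a b)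

-- ===== LEMMAS AND PROOFS =====

-- writing back the element just read leaves the list unchanged (any index)
theorem pySetD_pyGetD_self {α : Type} (xs : List α) (i : Int) (d : α) :
    PySem.List.pySetD xs i (PySem.List.pyGetD xs i d) = xs := by
  simp only [PySem.List.pySetD, PySem.List.pySet?, PySem.List.pyGetD, PySem.List.pyGet?]
  cases h : PySem.List.pyIdx? xs.length i with
  | none => simp
  | some k =>
    have hk : k < xs.length := by
      simp only [PySem.List.pyIdx?] at h
      split_ifs at h <;> simp only [Option.some.injEq] at h <;> omega
    simp [List.getElem?_eq_getElem hk, List.set_getElem_self]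

theorem plusAt_zero (g : List (List Int)) (r c : Int) : plusAt g r c 0 = g := by
  simp [plusAt, pySetD_pyGetD_self]

theorem minusAt_zero (g : List (List Int)) (r c : Int) : minusAt g r c 0 = g := by
  simp [minusAt, pySetD_pyGetD_self]

theorem stepA_skip (eta : List Int) (a b : Int) (g : List (List Int)) (c : Int)
    (hb : b ≠ c) (ha : a ≠ c) : stepA eta a b g c = g := by
  simp [stepA, if_neg hb, if_neg ha, plusAt_zero, minusAt_zero]

theorem stepA_at_a (eta : List Int) (a b : Int) (g : List (List Int)) (hab : a ≠ b) :
    stepA eta a b g a = minusAt g a b (PySem.List.pyGetD eta a 0) := by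
  have hba : ¬ b = a := fun h => hab h.symm
  simp [stepA, if_neg hba, plusAt_zero]

theorem stepA_at_b (eta : List Int) (a b : Int) (g : List (List Int)) (hab : a ≠ b) :
    stepA eta a b g b = plusAt g b a (PySem.List.pyGetD eta b 0) := by
  simp [stepA, if_neg hab, minusAt_zero]

theorem fold_skip (eta : List Int) (a b : Int) (l : List Int) (g : List (List Int))
    (h : ∀ c ∈ l, b ≠ c ∧ a ≠ c) : l.foldl (stepA eta a b) g = g := by
  induction l generalizing g with
  | nil => rfl
  | cons x xs ih =>
    have hx := h x (List.mem_cons_self)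
    simp only [List.foldl_cons, stepA_skip eta a b g x hx.1 hx.2]
    exact ih g (fun c hc => h c (List.mem_cons_of_mem _ hc))

theorem zerosA_eq (n : Nat) :
    zerosA (n : Int) = List.replicate n (List.replicate n (0 : Int)) := by
  simp [zerosA, List.map_const', PySem.List.length_pyRange_one]

theorem plusAt_minusAt_comm (g : List (List Int)) (ia ib : Nat) (ta tb : Int)
    (hab : ia ≠ ib) :
    plusAt (minusAt g (ia : Int) (ib : Int) ta) (ib : Int) (ia : Int) tb
      = minusAt (plusAt g (ib : Int) (ia : Int) tb) (ia : Int) (ib : Int) ta := by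
  simp only [plusAt, minusAt, PySem.List.pySetD_natCast, PySem.List.pyGetD_natCast,
    List.getD_eq_getElem?_getD, List.getElem?_set_ne hab, List.getElem?_set_ne (Ne.symm hab)]
  exact List.set_comm _ _ hab

-- ===== VERDICT (by name: the statement is the Claim_ definition above) =====
theorem so_generator_spec : Claim_equal_so_generator := by
  intro eta a b _ hpre
  obtain ⟨hab, hrange⟩ := hpre
  unfold Spec_so_generator so_generator so_generator_alt
  rw [if_neg hab, if_neg hab]
  rcases hrange with hnil | ⟨h1, h2, h3, h4⟩
  · subst hnil
    have hA : ¬(0 ≤ a ∧ a < ((([] : List Int)).length : Int)) := by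
      simp only [List.length_nil, Nat.cast_zero]; omega
    have hB : ¬(0 ≤ b ∧ b < ((([] : List Int)).length : Int)) := by
      simp only [List.length_nil, Nat.cast_zero]; omega
    rw [if_neg hA, if_neg hB]
    simp [zerosA, PySem.List.pyRange_one_eq_nil le_rfl]
  · set n : Nat := eta.length with hn
    rw [zerosA_eq]
    set Z := List.replicate n (List.replicate n (0 : Int)) with hZ
    by_cases h0a : 0 ≤ a <;> by_cases h0b : 0 ≤ b
    · -- both nonneg
      rw [if_pos ⟨h0a, h2⟩, if_pos ⟨h0b, h4⟩]
      obtain ⟨ka, rfl⟩ : ∃ k : Nat, a = (k : Int) := ⟨a.toNat, by omega⟩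
      obtain ⟨kb, rfl⟩ : ∃ k : Nat, b = (k : Int) := ⟨b.toNat, by omega⟩
      have hkk : ka ≠ kb := by omega
      rcases lt_or_gt_of_ne hkk with hlt | hgt
      · -- a < b : skip, hit a, skip, hit b, skip; then commute
        rw [PySem.List.pyRange_one_append 0 (ka : Int) (n : Int) (by omega) (by omega),
            PySem.List.pyRange_one_cons (show (ka : Int) < (n : Int) by omega),
            PySem.List.pyRange_one_append (ka + 1) (kb : Int) (n : Int) (by omega) (by omega),
            PySem.List.pyRange_one_cons (show (kb : Int) < (n : Int) by omega)]
        simp only [List.foldl_append, List.foldl_cons]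
        rw [fold_skip _ _ _ _ _ (by intro c hc; rw [PySem.List.mem_pyRange_one] at hc; omega),
            stepA_at_a _ _ _ _ hab,
            fold_skip _ _ _ _ _ (by intro c hc; rw [PySem.List.mem_pyRange_one] at hc; omega),
            stepA_at_b _ _ _ _ hab,
            fold_skip _ _ _ _ _ (by intro c hc; rw [PySem.List.mem_pyRange_one] at hc; omega)]
        exact plusAt_minusAt_comm Z ka kb _ _ hkk
      · -- b < a : the loop applies the b-write then the a-write, exactly B's order
        rw [PySem.List.pyRange_one_append 0 (kb : Int) (n : Int) (by omega) (by omega),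
            PySem.List.pyRange_one_cons (show (kb : Int) < (n : Int) by omega),
            PySem.List.pyRange_one_append (kb + 1) (ka : Int) (n : Int) (by omega) (by omega),
            PySem.List.pyRange_one_cons (show (ka : Int) < (n : Int) by omega)]
        simp only [List.foldl_append, List.foldl_cons]
        rw [fold_skip _ _ _ _ _ (by intro c hc; rw [PySem.List.mem_pyRange_one] at hc; omega),
            stepA_at_b _ _ _ _ hab,
            fold_skip _ _ _ _ _ (by intro c hc; rw [PySem.List.mem_pyRange_one] at hc; omega),
            stepA_at_a _ _ _ _ hab,
            fold_skip _ _ _ _ _ (by intro c hc; rw [PySem.List.mem_pyRange_one] at hc; omega)]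
    · -- 0 ≤ a, b < 0 : only c = a fires
      rw [if_pos ⟨h0a, h2⟩, if_neg (show ¬(0 ≤ b ∧ b < (n:Int)) by omega)]
      rw [PySem.List.pyRange_one_append 0 a (n : Int) h0a (le_of_lt h2),
          PySem.List.pyRange_one_cons h2]
      simp only [List.foldl_append, List.foldl_cons]
      rw [fold_skip _ _ _ _ _ (by intro c hc; rw [PySem.List.mem_pyRange_one] at hc; omega),
          stepA_at_a _ _ _ _ hab,
          fold_skip _ _ _ _ _ (by intro c hc; rw [PySem.List.mem_pyRange_one] at hc; omega)]
    · -- a < 0, 0 ≤ b : only c = b fires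
      rw [if_neg (show ¬(0 ≤ a ∧ a < (n:Int)) by omega), if_pos ⟨h0b, h4⟩]
      rw [PySem.List.pyRange_one_append 0 b (n : Int) h0b (le_of_lt h4),
          PySem.List.pyRange_one_cons h4]
      simp only [List.foldl_append, List.foldl_cons]
      rw [fold_skip _ _ _ _ _ (by intro c hc; rw [PySem.List.mem_pyRange_one] at hc; omega),
          stepA_at_b _ _ _ _ hab,
          fold_skip _ _ _ _ _ (by intro c hc; rw [PySem.List.mem_pyRange_one] at hc; omega)]
    · -- both negative : nothing fires
      rw [if_neg (show ¬(0 ≤ a ∧ a < (n:Int)) by omega), if_neg (show ¬(0 ≤ b ∧ b < (n:Int)) by omega)]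
      exact fold_skip _ _ _ _ _ (by intro c hc; rw [PySem.List.mem_pyRange_one] at hc; omega)
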